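-- pv_equiv track=rewrite | github.com/NatasaPopeskaDimitrova/finance_notifier | src/app/news.py | filter_titles
-- ===== SOURCE A (Python) =====
-- from typing import List, Dict, Iterable
--
-- def filter_titles(items: List[Dict[str, str]], required_keywords: Iterable[str] = ()) -> List[Dict[str, str]]:
--     """
--     Filter news items so that only those containing required keywords
--     in their title are kept (case-insensitive). If no keywords given, return as-is.
--     """
--     # TODO: If no required keywords, return items unchanged
--     # TODO: Otherwise, keep only items whose title contains any keyword (case-insensitive)
--     req = [k.strip().lower() for k in required_keywords or [] if k.strip()]
--     if not req:
--         return items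
--
--     out: List[Dict[str, str]] = []
--     for it in items:
--         title = (it.get("title") or "").lower()
--         if any(k in title for k in req):
--             out.append(it)
--     return out
-- ===== SOURCE B (Python) =====
-- from typing import List, Dict, Iterable
--
--
-- def _clean(required_keywords) -> set:
--     # build the keyword SET (dedup is harmless for the any-test) with an explicit loop
--     req = set()
--     for k in required_keywords or []:
--         k = k.strip().lower()
--         if k:
--             req.add(k)
--     return req
--
--
-- def _hits(title: str, req: set) -> bool:
--     # one left-to-right scan over the title's start positions, matching every
--     # keyword at each position (naive multi-pattern matching), instead of one
--     # full substring search per keyword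
--     for i in range(len(title) + 1):
--         for k in req:
--             if title.startswith(k, i):
--                 return True
--     return False
--
--
-- def filter_titles(items: List[Dict[str, str]], required_keywords: Iterable[str] = ()) -> List[Dict[str, str]]:
--     req = _clean(required_keywords)
--     if not req:
--         return items
--     return [it for it in items if _hits((it.get("title") or "").lower(), req)]
-- ===== Notes on version B (the rewrite author's own statement) =====
-- stated objective: alternative
-- what changed: Keywords are collected into a set by an explicit cleaning loop instead of a list comprehension, and the per-item test scans the title's start positions once matching all keywords at each position (naive multi-pattern matching) instead of running one full substring search per keyword; the item loop becomes a comprehension filter over helper functions.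
import Mathlib
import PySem

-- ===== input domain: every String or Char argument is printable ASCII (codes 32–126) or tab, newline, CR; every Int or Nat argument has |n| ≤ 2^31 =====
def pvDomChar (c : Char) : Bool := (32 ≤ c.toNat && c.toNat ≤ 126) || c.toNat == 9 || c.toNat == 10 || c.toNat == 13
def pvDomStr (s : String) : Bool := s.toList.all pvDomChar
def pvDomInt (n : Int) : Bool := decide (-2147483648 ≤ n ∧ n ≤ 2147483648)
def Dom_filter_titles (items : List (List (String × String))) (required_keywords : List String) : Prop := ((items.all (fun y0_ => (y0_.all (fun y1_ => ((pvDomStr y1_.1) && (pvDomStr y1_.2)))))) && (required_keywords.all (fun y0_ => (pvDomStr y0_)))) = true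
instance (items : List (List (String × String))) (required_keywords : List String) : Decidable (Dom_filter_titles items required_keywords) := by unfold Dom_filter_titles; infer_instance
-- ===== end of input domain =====

-- B collects the cleaned keywords into a SET by an explicit loop and tests each title by a
-- single scan over its start positions matching every keyword there (naive multi-pattern
-- matching) instead of one full substring search per keyword; alternative structure, same cost.

-- ===== PORT A =====
def filter_titles (items : List (List (String × String))) (required_keywords : List String) : List (List (String × String)) :=
  -- req = [k.strip().lower() for k in required_keywords or [] if k.strip()]
  let req := required_keywords.filterMap (fun k =>
    if PySem.Str.strip k = "" then none else some (PySem.Str.lower (PySem.Str.strip k)))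
  if req = [] then items
  else
    -- out = []; for it in items: title = (it.get("title") or "").lower(); if any(k in title for k in req): out.append(it)
    items.foldl (fun out it =>
      let title := PySem.Str.lower (PySem.Dict.getD (PySem.Dict.mk it) "title" "")
      if req.any (fun k => PySem.Str.isIn k title) then out ++ [it] else out) []

-- ===== PORT B =====
-- _clean: req = set(); for k in required_keywords or []: k = k.strip().lower(); if k: req.add(k)
def ftClean (required_keywords : List String) : PySem.Set String :=
  required_keywords.foldl (fun req k =>
    let k' := PySem.Str.lower (PySem.Str.strip k)
    if k' = "" then req else PySem.Set.add req k') PySem.Set.empty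

-- _hits: for i in range(len(title)+1): for k in req: if title.startswith(k, i): return True
-- (the early return of an order-independent boolean over the set is ported as 'any')
def ftHits (title : List Char) (req : PySem.Set String) : Bool :=
  (List.range (title.length + 1)).any (fun i =>
    req.any (fun k => PySem.Chars.startswith (title.drop i) k.toList))

def filter_titles_alt (items : List (List (String × String))) (required_keywords : List String) : List (List (String × String)) :=
  let req := ftClean required_keywords
  if req = [] then items
  else items.filter (fun it =>
    ftHits ((PySem.Str.lower (PySem.Dict.getD (PySem.Dict.mk it) "title" "")).toList) req)

-- ===== PRECONDITION & SPEC =====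
def Spec_filter_titles (items : List (List (String × String))) (required_keywords : List String) (out : List (List (String × String))) : Prop := out = filter_titles_alt items required_keywords
instance (items : List (List (String × String))) (required_keywords : List String) (out : List (List (String × String))) : Decidable (Spec_filter_titles items required_keywords out) := by unfold Spec_filter_titles; infer_instance

-- ===== CLAIM (what is proved, stated in full; the proofs are below) =====
def Claim_equal_filter_titles : Prop := ∀ (items : List (List (String × String))) (required_keywords : List String), Dom_filter_titles items required_keywords → Spec_filter_titles items required_keywords (filter_titles items required_keywords)

-- ===== LEMMAS AND PROOFS =====

-- A's cleaned keyword list (shared spine of both cleanings)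
def ftReq (required_keywords : List String) : List String :=
  required_keywords.filterMap (fun k =>
    if PySem.Str.strip k = "" then none else some (PySem.Str.lower (PySem.Str.strip k)))

theorem lower_eq_empty_iff (s : String) : PySem.Str.lower s = "" ↔ s = "" := by
  constructor
  · intro h
    have := congrArg String.toList h
    simp only [PySem.Str.toList_lower] at this
    have : s.toList = [] := by
      cases hs : s.toList with
      | nil => rfl
      | cons c t => simp [hs, PySem.Chars.lower] at this
    cases s; simp_all
  · intro h; subst h; rfl

-- B's cleaning fold builds exactly set(ftReq …)
theorem ftClean_eq_ofList (ks : List String) : ftClean ks = PySem.Set.ofList (ftReq ks) := by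
  have key : ∀ (l : List String) (acc : PySem.Set String),
      l.foldl (fun req k =>
        let k' := PySem.Str.lower (PySem.Str.strip k)
        if k' = "" then req else PySem.Set.add req k') acc
        = (l.filterMap (fun k =>
            if PySem.Str.strip k = "" then none
            else some (PySem.Str.lower (PySem.Str.strip k)))).foldl PySem.Set.add acc := by
    intro l
    induction l with
    | nil => intro acc; simp
    | cons k t ih =>
      intro acc
      rw [List.foldl_cons, List.filterMap_cons]
      by_cases h : PySem.Str.strip k = ""
      · have h' : PySem.Str.lower (PySem.Str.strip k) = "" := by rw [h]; rfl
        rw [if_pos h]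
        show t.foldl _ (if PySem.Str.lower (PySem.Str.strip k) = "" then acc
          else PySem.Set.add acc (PySem.Str.lower (PySem.Str.strip k))) = _
        rw [if_pos h', ih]
      · have h' : ¬ PySem.Str.lower (PySem.Str.strip k) = "" :=
          fun hc => h ((lower_eq_empty_iff _).mp hc)
        rw [if_neg h]
        show t.foldl _ (if PySem.Str.lower (PySem.Str.strip k) = "" then acc
          else PySem.Set.add acc (PySem.Str.lower (PySem.Str.strip k))) = _
        rw [if_neg h', ih, List.foldl_cons]
  rw [ftClean, key, ftReq, PySem.Set.ofList_eq_foldl]; rfl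

theorem ftClean_eq_nil_iff (ks : List String) : ftClean ks = [] ↔ ftReq ks = [] := by
  rw [ftClean_eq_ofList]
  constructor
  · intro h
    cases hr : ftReq ks with
    | nil => rfl
    | cons k t =>
      have : k ∈ PySem.Set.ofList (ftReq ks) := by
        rw [PySem.Set.mem_ofList, hr]; exact List.mem_cons_self
      rw [h] at this; cases this
  · intro h; rw [h]; rfl

-- 'sub in title' (A's inner test) ↔ some start position ≤ len yields a prefix (B's inner test)
theorem isIn_iff_any_startswith (sub title : List Char) :
    PySem.Chars.isIn sub title =
      (List.range (title.length + 1)).any (fun i => PySem.Chars.startswith (title.drop i) sub) := by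
  rcases h : PySem.Chars.isIn sub title with _ | _
  · symm
    rw [List.any_eq_false]
    intro i _
    simp only [PySem.Chars.startswith_iff]
    intro hpre
    have : PySem.Chars.isIn sub title = true :=
      (PySem.Chars.exists_prefix_drop_iff_isIn sub title).mp ⟨i, hpre⟩
    simp [h] at this
  · symm
    rw [List.any_eq_true]
    obtain ⟨j, hj⟩ := (PySem.Chars.exists_prefix_drop_iff_isIn sub title).mpr h
    by_cases hle : j ≤ title.length
    · exact ⟨j, List.mem_range.mpr (by omega), (PySem.Chars.startswith_iff _ _).mpr hj⟩
    · have hnil : title.drop j = [] := List.drop_eq_nil_of_le (by omega)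
      have hsub : sub = [] := List.prefix_nil.mp (hnil ▸ hj)
      exact ⟨title.length, List.mem_range.mpr (by omega),
        (PySem.Chars.startswith_iff _ _).mpr (by simp [hsub])⟩

-- the per-item tests agree: any-substring over the list = position scan over the set
theorem hits_eq (title : String) (ks : List String) :
    ftHits title.toList (ftClean ks) = (ftReq ks).any (fun k => PySem.Str.isIn k title) := by
  rw [Bool.eq_iff_iff, ftHits]
  simp only [List.any_eq_true, PySem.Str.isIn_eq, isIn_iff_any_startswith]
  constructor
  · rintro ⟨i, hi, k, hk, h⟩
    have hk' : k ∈ ftReq ks := by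
      rw [ftClean_eq_ofList, PySem.Set.mem_ofList] at hk; exact hk
    exact ⟨k, hk', i, hi, h⟩
  · rintro ⟨k, hk, i, hi, h⟩
    have hk' : k ∈ ftClean ks := by
      rw [ftClean_eq_ofList, PySem.Set.mem_ofList]; exact hk
    exact ⟨i, hi, k, hk', h⟩

theorem filter_titles_eq_alt (items : List (List (String × String))) (required_keywords : List String) :
    filter_titles items required_keywords = filter_titles_alt items required_keywords := by
  unfold filter_titles filter_titles_alt
  by_cases hreq : ftReq required_keywords = []
  · rw [ftReq] at hreq
    have hB : ftClean required_keywords = [] := (ftClean_eq_nil_iff required_keywords).mpr (by rw [ftReq]; exact hreq)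
    simp [hreq, hB]
  · have hB : ¬ ftClean required_keywords = [] := by
      simp [ftClean_eq_nil_iff, hreq]
    rw [ftReq] at hreq
    simp only []
    rw [if_neg hreq, if_neg hB, PySem.List.foldl_append_if_eq_filter, List.nil_append]
    apply List.filter_congr
    intro it _
    rw [hits_eq]
    rfl

-- ===== VERDICT (by name: the statement is the Claim_ definition above) =====
theorem filter_titles_spec : Claim_equal_filter_titles := by
  intro items required_keywords _
  exact filter_titles_eq_alt items required_keywords
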